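-- pv_equiv track=rewrite | github.com/tranzmatt/OpenViking | openviking/observability/usage_audit/projection.py | derive_api_type
-- ===== SOURCE A (Python) =====
-- def derive_api_type(route: str) -> str:
--     """Derive the stable product-facing API type from a route template."""
--     if route == "/api/v1/search/find":
--         return "search.find"
--     if route == "/api/v1/search/search":
--         return "search.search"
--     prefix_map = {
--         "/api/v1/resources": "resources",
--         "/api/v1/skills": "skills",
--         "/api/v1/sessions": "sessions",
--         "/api/v1/fs": "filesystem",
--         "/api/v1/content": "content",
--         "/api/v1/admin": "admin",
--         "/api/v1/tasks": "tasks",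
--     }
--     for prefix, api_type in prefix_map.items():
--         if route == prefix or route.startswith(prefix + "/"):
--             return api_type
--     parts = [part for part in route.split("/") if part]
--     if len(parts) >= 3 and parts[0] == "api" and parts[1] == "v1":
--         return parts[2]
--     return "unknown"
-- ===== SOURCE B (Python) =====
-- _SPECIAL = {
--     "/api/v1/search/find": "search.find",
--     "/api/v1/search/search": "search.search",
-- }
--
--
-- def derive_api_type(route: str) -> str:
--     """Derive the stable product-facing API type from a route template."""
--     if route in _SPECIAL:
--         return _SPECIAL[route]
--     if route == "/api/v1/fs" or route.startswith("/api/v1/fs/"):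
--         return "filesystem"
--     parts = [part for part in route.split("/") if part]
--     if len(parts) >= 3 and parts[:2] == ["api", "v1"]:
--         return parts[2]
--     return "unknown"
-- ===== Notes on version B (the rewrite author's own statement) =====
-- stated objective: simpler
-- what changed: B drops A's 7-entry prefix-map scan: it looks the route up in a 2-entry special-route dict, keeps the single fs->filesystem prefix check, and derives every other API type generically as the third non-empty path segment (parts[2]), which A's map values always equal.
import Mathlib
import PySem

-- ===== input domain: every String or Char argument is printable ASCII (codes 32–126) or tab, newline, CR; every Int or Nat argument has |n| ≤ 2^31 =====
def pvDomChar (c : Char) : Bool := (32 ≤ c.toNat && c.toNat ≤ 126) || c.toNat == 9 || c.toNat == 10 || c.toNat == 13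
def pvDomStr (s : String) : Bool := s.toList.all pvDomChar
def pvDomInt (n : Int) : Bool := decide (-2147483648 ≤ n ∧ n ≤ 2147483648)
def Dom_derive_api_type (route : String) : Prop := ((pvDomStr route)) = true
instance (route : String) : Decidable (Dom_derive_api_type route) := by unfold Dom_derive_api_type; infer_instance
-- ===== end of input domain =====

-- B replaces A's 7-entry prefix-map loop by a 2-entry special-route dict, one explicit
-- fs→filesystem check, and the generic parts[2] rule (objective: simpler).
-- Both ports work on route.toList; route.split("/") is PySem.Chars.splitOn (the separator "/" is
-- non-empty, so Python's split never raises) and startswith is PySem.Chars.startswith — exact here.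
-- The slice parts[:2] in Source B is ported as List.take 2 (its exact meaning for this nonneg bound).

-- ===== PORT A =====
def pvPrefixMap : List (List Char × String) :=
  [("/api/v1/resources".toList, "resources"),
   ("/api/v1/skills".toList, "skills"),
   ("/api/v1/sessions".toList, "sessions"),
   ("/api/v1/fs".toList, "filesystem"),
   ("/api/v1/content".toList, "content"),
   ("/api/v1/admin".toList, "admin"),
   ("/api/v1/tasks".toList, "tasks")]

-- the 'for prefix, api_type in prefix_map.items(): if … : return api_type' loop
def pvPrefixLoop : List (List Char × String) → List Char → Option String
  | [], _ => none
  | (p, t) :: rest, r =>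
    if r = p ∨ PySem.Chars.startswith r (p ++ ['/']) then some t else pvPrefixLoop rest r

def pvA (r : List Char) : String :=
  if r = "/api/v1/search/find".toList then "search.find"
  else if r = "/api/v1/search/search".toList then "search.search"
  else
    match pvPrefixLoop pvPrefixMap r with
    | some t => t
    | none =>
      let parts := (PySem.Chars.splitOn r ['/']).filter (fun p => decide (p ≠ []))
      if 3 ≤ parts.length ∧ PySem.List.pyGetD parts 0 [] = "api".toList ∧
          PySem.List.pyGetD parts 1 [] = "v1".toList then
        String.ofList (PySem.List.pyGetD parts 2 [])
      else "unknown"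

def derive_api_type (route : String) : String := pvA route.toList

-- ===== PORT B =====
def pvSpecials : PySem.Dict (List Char) String :=
  PySem.Dict.mk
    [("/api/v1/search/find".toList, "search.find"),
     ("/api/v1/search/search".toList, "search.search")]

def pvB (r : List Char) : String :=
  match PySem.Dict.get? pvSpecials r with
  | some t => t
  | none =>
    if r = "/api/v1/fs".toList ∨ PySem.Chars.startswith r "/api/v1/fs/".toList then "filesystem"
    else
      let parts := (PySem.Chars.splitOn r ['/']).filter (fun p => decide (p ≠ []))
      if 3 ≤ parts.length ∧ List.take 2 parts = ["api".toList, "v1".toList] then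
        String.ofList (PySem.List.pyGetD parts 2 [])
      else "unknown"

def derive_api_type_alt (route : String) : String := pvB route.toList

-- ===== PRECONDITION & SPEC =====
def Spec_derive_api_type (route : String) (out : String) : Prop := out = derive_api_type_alt route
instance (route : String) (out : String) : Decidable (Spec_derive_api_type route out) := by unfold Spec_derive_api_type; infer_instance

-- ===== CLAIM (what is proved, stated in full; the proofs are below) =====
def Claim_equal_derive_api_type : Prop := ∀ (route : String), Dom_derive_api_type route → Spec_derive_api_type route (derive_api_type route)

-- ===== LEMMAS AND PROOFS =====

-- fuel-free characterisation of PySem.Chars.splitOn with a single-character separator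
def pvSp (c : Char) : List Char → List Char → List (List Char)
  | [], cur => [cur.reverse]
  | d :: rest, cur => if d = c then cur.reverse :: pvSp c rest [] else pvSp c rest (d :: cur)

lemma pvGo_spec (c : Char) : ∀ (fuel : Nat) (l cur : List Char) (acc : List (List Char)),
    l.length ≤ fuel →
    PySem.Chars.splitOn.go [c] fuel l cur acc = acc.reverse ++ pvSp c l cur := by
  intro fuel
  induction fuel with
  | zero =>
    intro l cur acc h
    have hl : l = [] := List.length_eq_zero_iff.mp (Nat.le_zero.mp h)
    subst hl
    simp [PySem.Chars.splitOn.go, pvSp]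
  | succ n ih =>
    intro l cur acc h
    cases l with
    | nil => simp [PySem.Chars.splitOn.go, pvSp]
    | cons d rest =>
      have hlen : rest.length ≤ n := by simpa using h
      by_cases hd : d = c
      · subst hd
        have hpre : List.isPrefixOf [d] (d :: rest) = true := by simp [List.isPrefixOf]
        rw [PySem.Chars.splitOn.go, if_pos hpre]
        simp only [List.length_cons, List.length_nil, Nat.zero_add, List.drop_one, List.tail_cons]
        rw [ih rest [] (cur.reverse :: acc) hlen]
        simp [pvSp]
      · have hpre : List.isPrefixOf [c] (d :: rest) = false := by
          simp [List.isPrefixOf]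
          intro hcd; exact hd hcd.symm
        rw [PySem.Chars.splitOn.go, if_neg (by simp [hpre])]
        rw [ih rest (d :: cur) acc hlen]
        simp [pvSp, hd]

lemma pvSplitOn_spec (c : Char) (l : List Char) :
    PySem.Chars.splitOn l [c] = pvSp c l [] := by
  unfold PySem.Chars.splitOn
  exact pvGo_spec c _ l [] [] (by omega)

lemma pvSpecials_get_none {r : List Char} (h1 : r ≠ "/api/v1/search/find".toList)
    (h2 : r ≠ "/api/v1/search/search".toList) : PySem.Dict.get? pvSpecials r = none := by
  simp at h1 h2
  rw [pvSpecials, PySem.Dict.get?_mk_cons, PySem.Dict.get?_mk_cons]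
  simp [PySem.Dict.get?, Ne.symm h1, Ne.symm h2]

lemma pvB_resources (t : List Char) :
    pvB ("/api/v1/resources".toList ++ '/' :: t) = "resources" := by
  unfold pvB
  rw [pvSpecials_get_none (by simp) (by simp)]
  rw [if_neg (by
    rintro (h | h)
    · simp at h
    · rw [PySem.Chars.startswith_iff] at h
      simp [List.cons_prefix_cons] at h)]
  rw [pvSplitOn_spec]
  simp [pvSp]
  simp [pysem]

lemma pvB_skills (t : List Char) :
    pvB ("/api/v1/skills".toList ++ '/' :: t) = "skills" := by
  unfold pvB
  rw [pvSpecials_get_none (by simp) (by simp)]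
  rw [if_neg (by
    rintro (h | h)
    · simp at h
    · rw [PySem.Chars.startswith_iff] at h
      simp [List.cons_prefix_cons] at h)]
  rw [pvSplitOn_spec]
  simp [pvSp]
  simp [pysem]

lemma pvB_sessions (t : List Char) :
    pvB ("/api/v1/sessions".toList ++ '/' :: t) = "sessions" := by
  unfold pvB
  rw [pvSpecials_get_none (by simp) (by simp)]
  rw [if_neg (by
    rintro (h | h)
    · simp at h
    · rw [PySem.Chars.startswith_iff] at h
      simp [List.cons_prefix_cons] at h)]
  rw [pvSplitOn_spec]
  simp [pvSp]
  simp [pysem]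

lemma pvB_fs (t : List Char) :
    pvB ("/api/v1/fs".toList ++ '/' :: t) = "filesystem" := by
  unfold pvB
  rw [pvSpecials_get_none (by simp) (by simp)]
  rw [if_pos (Or.inr (by
    rw [PySem.Chars.startswith_iff]
    exact ⟨t, by simp⟩))]

lemma pvB_content (t : List Char) :
    pvB ("/api/v1/content".toList ++ '/' :: t) = "content" := by
  unfold pvB
  rw [pvSpecials_get_none (by simp) (by simp)]
  rw [if_neg (by
    rintro (h | h)
    · simp at h
    · rw [PySem.Chars.startswith_iff] at h
      simp [List.cons_prefix_cons] at h)]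
  rw [pvSplitOn_spec]
  simp [pvSp]
  simp [pysem]

lemma pvB_admin (t : List Char) :
    pvB ("/api/v1/admin".toList ++ '/' :: t) = "admin" := by
  unfold pvB
  rw [pvSpecials_get_none (by simp) (by simp)]
  rw [if_neg (by
    rintro (h | h)
    · simp at h
    · rw [PySem.Chars.startswith_iff] at h
      simp [List.cons_prefix_cons] at h)]
  rw [pvSplitOn_spec]
  simp [pvSp]
  simp [pysem]

lemma pvB_tasks (t : List Char) :
    pvB ("/api/v1/tasks".toList ++ '/' :: t) = "tasks" := by
  unfold pvB
  rw [pvSpecials_get_none (by simp) (by simp)]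
  rw [if_neg (by
    rintro (h | h)
    · simp at h
    · rw [PySem.Chars.startswith_iff] at h
      simp [List.cons_prefix_cons] at h)]
  rw [pvSplitOn_spec]
  simp [pvSp]
  simp [pysem]

set_option maxHeartbeats 2000000 in
theorem pv_main (r : List Char) : pvA r = pvB r := by
  by_cases hf : r = "/api/v1/search/find".toList
  · subst hf; decide
  by_cases hs : r = "/api/v1/search/search".toList
  · subst hs; decide
  rw [pvA, if_neg hf, if_neg hs]
  simp only [pvPrefixMap, pvPrefixLoop]
  by_cases h1 : r = "/api/v1/resources".toList ∨
      PySem.Chars.startswith r ("/api/v1/resources".toList ++ ['/']) = true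
  · rw [if_pos h1]
    rcases h1 with rfl | h1
    · decide
    · rw [PySem.Chars.startswith_iff] at h1
      obtain ⟨t, rfl⟩ := h1
      rw [List.append_assoc, List.singleton_append]
      exact (pvB_resources t).symm
  rw [if_neg h1]
  by_cases h2 : r = "/api/v1/skills".toList ∨
      PySem.Chars.startswith r ("/api/v1/skills".toList ++ ['/']) = true
  · rw [if_pos h2]
    rcases h2 with rfl | h2
    · decide
    · rw [PySem.Chars.startswith_iff] at h2
      obtain ⟨t, rfl⟩ := h2
      rw [List.append_assoc, List.singleton_append]
      exact (pvB_skills t).symm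
  rw [if_neg h2]
  by_cases h3 : r = "/api/v1/sessions".toList ∨
      PySem.Chars.startswith r ("/api/v1/sessions".toList ++ ['/']) = true
  · rw [if_pos h3]
    rcases h3 with rfl | h3
    · decide
    · rw [PySem.Chars.startswith_iff] at h3
      obtain ⟨t, rfl⟩ := h3
      rw [List.append_assoc, List.singleton_append]
      exact (pvB_sessions t).symm
  rw [if_neg h3]
  by_cases h4 : r = "/api/v1/fs".toList ∨
      PySem.Chars.startswith r ("/api/v1/fs".toList ++ ['/']) = true
  · rw [if_pos h4]
    rcases h4 with rfl | h4
    · decide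
    · rw [PySem.Chars.startswith_iff] at h4
      obtain ⟨t, rfl⟩ := h4
      rw [List.append_assoc, List.singleton_append]
      exact (pvB_fs t).symm
  rw [if_neg h4]
  by_cases h5 : r = "/api/v1/content".toList ∨
      PySem.Chars.startswith r ("/api/v1/content".toList ++ ['/']) = true
  · rw [if_pos h5]
    rcases h5 with rfl | h5
    · decide
    · rw [PySem.Chars.startswith_iff] at h5
      obtain ⟨t, rfl⟩ := h5
      rw [List.append_assoc, List.singleton_append]
      exact (pvB_content t).symm
  rw [if_neg h5]
  by_cases h6 : r = "/api/v1/admin".toList ∨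
      PySem.Chars.startswith r ("/api/v1/admin".toList ++ ['/']) = true
  · rw [if_pos h6]
    rcases h6 with rfl | h6
    · decide
    · rw [PySem.Chars.startswith_iff] at h6
      obtain ⟨t, rfl⟩ := h6
      rw [List.append_assoc, List.singleton_append]
      exact (pvB_admin t).symm
  rw [if_neg h6]
  by_cases h7 : r = "/api/v1/tasks".toList ∨
      PySem.Chars.startswith r ("/api/v1/tasks".toList ++ ['/']) = true
  · rw [if_pos h7]
    rcases h7 with rfl | h7
    · decide
    · rw [PySem.Chars.startswith_iff] at h7
      obtain ⟨t, rfl⟩ := h7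
      rw [List.append_assoc, List.singleton_append]
      exact (pvB_tasks t).symm
  rw [if_neg h7]
  -- no prefix matched: both sides fall through to the identical parts computation
  rw [pvB, pvSpecials_get_none hf hs]
  have hfs : ("/api/v1/fs".toList ++ ['/']) = "/api/v1/fs/".toList := by decide
  rw [hfs] at h4
  rw [if_neg h4]
  generalize (PySem.Chars.splitOn r ['/']).filter (fun p => decide (p ≠ [])) = parts
  rcases parts with _ | ⟨a, _ | ⟨b, _ | ⟨c, rest⟩⟩⟩
  · simp
  · simp
  · simp
  · by_cases ha : a = "api".toList <;> by_cases hb : b = "v1".toList <;>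
      simp [ha, hb, pysem]

-- ===== VERDICT (by name: the statement is the Claim_ definition above) =====
theorem derive_api_type_spec : Claim_equal_derive_api_type := by
  intro route _
  unfold Spec_derive_api_type derive_api_type derive_api_type_alt
  exact pv_main route.toList
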